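-- pv_equiv track=rewrite | github.com/Pengwin-dev/parser-agent-v2 | api.py | parse_summary_to_dict
-- ===== SOURCE A (Python) =====
-- from typing import Optional, Dict, Any
--
-- def parse_summary_to_dict(summary_text: str) -> Dict[str, Any]:
--     """
--     Parse the summary text into a structured dictionary.
--
--     Args:
--         summary_text: Raw summary text from the parser
--
--     Returns:
--         Dictionary with structured summary data
--     """
--     lines = summary_text.split('\n')
--     summary_data = {}
--
--     current_key = None
--     current_value = []
--
--     for line in lines:
--         line = line.strip()
--         if not line:
--             continue
--
--         # Check if this is a key line (e.g., "Company Name:", "Problem:", etc.)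
--         if ':' in line and any(keyword in line for keyword in [
--             'Company Name', 'Description', 'Problem', 'Solution',
--             'Funding Info', 'Industry Sectors', 'Total pages', 'Total text'
--         ]):
--             # Save previous key-value pair
--             if current_key and current_value:
--                 summary_data[current_key] = '\n'.join(current_value).strip()
--
--             # Start new key-value pair
--             parts = line.split(':', 1)
--             if len(parts) == 2:
--                 current_key = parts[0].strip()
--                 current_value = [parts[1].strip()] if parts[1].strip() else []
--             else:
--                 current_key = line
--                 current_value = []
--         else:
--             # Continue building current value
--             if current_key:
--                 current_value.append(line)
--
--     # Save the last key-value pair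
--     if current_key and current_value:
--         summary_data[current_key] = '\n'.join(current_value).strip()
--
--     return summary_data
-- ===== SOURCE B (Python) =====
-- _KEYWORDS = [
--     'Company Name', 'Description', 'Problem', 'Solution',
--     'Funding Info', 'Industry Sectors', 'Total pages', 'Total text'
-- ]
--
--
-- def _is_key_line(line):
--     return ':' in line and any(keyword in line for keyword in _KEYWORDS)
--
--
-- def parse_summary_to_dict(summary_text):
--     # stripped, non-empty lines
--     ls = [s for s in (x.strip() for x in summary_text.split('\n')) if s]
--     # lines before the first key line carry no key: drop them
--     while ls and not _is_key_line(ls[0]):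
--         ls = ls[1:]
--     summary_data = {}
--     # each iteration consumes one segment: a key line plus its continuation lines
--     while ls:
--         head, rest = ls[0], ls[1:]
--         k = 0
--         while k < len(rest) and not _is_key_line(rest[k]):
--             k += 1
--         body, ls = rest[:k], rest[k:]
--         before, after = head.split(':', 1)
--         key, inline = before.strip(), after.strip()
--         vals = ([inline] if inline else []) + body
--         if key and vals:
--             summary_data[key] = '\n'.join(vals).strip()
--     return summary_data
-- ===== Notes on version B (the rewrite author's own statement) =====
-- stated objective: alternative
-- what changed: A carries (current_key, current_value) state through one pass with deferred flushes; B first builds the stripped non-empty lines, drops the pre-key prefix, then splits the lines into segments (a key line plus its continuation lines via a scan to the next key line) and emits each segment independently.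
import Mathlib
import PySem

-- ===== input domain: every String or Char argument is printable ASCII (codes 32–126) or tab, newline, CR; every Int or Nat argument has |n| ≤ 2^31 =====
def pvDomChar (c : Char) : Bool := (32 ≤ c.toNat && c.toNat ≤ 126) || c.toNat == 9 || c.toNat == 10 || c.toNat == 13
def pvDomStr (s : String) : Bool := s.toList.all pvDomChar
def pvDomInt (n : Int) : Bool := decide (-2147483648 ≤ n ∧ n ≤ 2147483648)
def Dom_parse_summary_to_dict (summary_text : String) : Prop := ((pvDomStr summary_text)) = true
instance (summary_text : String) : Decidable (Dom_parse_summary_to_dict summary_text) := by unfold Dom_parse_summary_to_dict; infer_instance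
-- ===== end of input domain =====

-- B replaces A's one-pass carried (current_key, current_value) state by a segment split:
-- stripped non-empty lines, pre-key prefix dropped, then one dict entry per key-line segment
-- (objective: alternative decomposition, same cost).

-- ===== PORT A =====
-- the fixed keyword list of A
def pvKeywords : List String :=
  ["Company Name", "Description", "Problem", "Solution",
   "Funding Info", "Industry Sectors", "Total pages", "Total text"]

-- "':' in line and any(keyword in line for keyword in [...])"
def pvIsKeyLine (l : String) : Bool :=
  PySem.Str.isIn ":" l && pvKeywords.any (fun k => PySem.Str.isIn k l)

-- truthiness of current_key : Optional[str]
def pvTruthy : Option String → Bool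
  | some k => decide (k ≠ "")
  | none => false

-- "if current_key and current_value: summary_data[current_key] = '\n'.join(current_value).strip()"
def pvFlush (d : PySem.Dict String String) (ck : Option String) (cv : List String) :
    PySem.Dict String String :=
  if pvTruthy ck ∧ cv ≠ [] then
    d.insert (ck.getD "") (PySem.Str.strip (PySem.Str.join "\n" cv))
  else d

-- A's loop body after 'line = line.strip(); if not line: continue' (l is the stripped line)
def pvCore (st : PySem.Dict String String × Option String × List String) (l : String) :
    PySem.Dict String String × Option String × List String :=
  if pvIsKeyLine l then
    let d' := pvFlush st.1 st.2.1 st.2.2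
    match PySem.Str.splitMax? l ":" 1 with
    | some [a, b] =>
        let key := PySem.Str.strip a
        let v := PySem.Str.strip b
        (d', some key, if v = "" then [] else [v])
    | _ => (d', some l, [])           -- the 'len(parts) != 2' branch of A (unreachable: ':' ∈ l)
  else
    if pvTruthy st.2.1 then (st.1, st.2.1, st.2.2 ++ [l]) else st

-- one iteration of A's for-loop
def pvStepA (st : PySem.Dict String String × Option String × List String) (line : String) :
    PySem.Dict String String × Option String × List String :=
  let l := PySem.Str.strip line
  if l = "" then st else pvCore st l

def parse_summary_to_dict (summary_text : String) : List (String × String) :=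
  let lines := (PySem.Str.split? summary_text "\n").getD []   -- sep "\n" ≠ "": split? is some
  let st := lines.foldl pvStepA (PySem.Dict.empty, none, [])
  (pvFlush st.1 st.2.1 st.2.2).items

-- ===== PORT B =====
-- "not _is_key_line(l)"
def pvNotKey (l : String) : Bool := !pvIsKeyLine l

-- emit one segment: 'head.split(':',1); vals = inline? + body; insert if key and vals'
def pvSeg (d : PySem.Dict String String) (head : String) (body : List String) :
    PySem.Dict String String :=
  match PySem.Str.splitMax? head ":" 1 with
  | some [a, b] =>
      let key := PySem.Str.strip a
      let inline := PySem.Str.strip b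
      let vals := (if inline = "" then [] else [inline]) ++ body
      if key ≠ "" ∧ vals ≠ [] then
        d.insert key (PySem.Str.strip (PySem.Str.join "\n" vals))
      else d
  | _ => d                            -- unreachable: head is a key line, so ':' ∈ head

-- B's outer while loop; fuel = list length bounds the iterations (standard while-loop port)
def pvGo : Nat → PySem.Dict String String → List String → PySem.Dict String String
  | 0, d, _ => d
  | _ + 1, d, [] => d
  | fuel + 1, d, head :: rest =>
      pvGo fuel (pvSeg d head (rest.takeWhile pvNotKey)) (rest.dropWhile pvNotKey)

def parse_summary_to_dict_alt (summary_text : String) : List (String × String) :=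
  let ls₀ := (((PySem.Str.split? summary_text "\n").getD []).map PySem.Str.strip).filter
      (fun s => s ≠ "")
  let ls := ls₀.dropWhile pvNotKey
  (pvGo ls.length PySem.Dict.empty ls).items

-- ===== PRECONDITION & SPEC =====
def Spec_parse_summary_to_dict (summary_text : String) (out : List (String × String)) : Prop := out = parse_summary_to_dict_alt summary_text
instance (summary_text : String) (out : List (String × String)) : Decidable (Spec_parse_summary_to_dict summary_text out) := by unfold Spec_parse_summary_to_dict; infer_instance

-- ===== CLAIM (what is proved, stated in full; the proofs are below) =====
def Claim_equal_parse_summary_to_dict : Prop := ∀ (summary_text : String), Dom_parse_summary_to_dict summary_text → Spec_parse_summary_to_dict summary_text (parse_summary_to_dict summary_text)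

-- ===== LEMMAS AND PROOFS =====

-- a string containing ':' splits into exactly two parts under split(':', 1)
theorem pv_go_zero (sep : List Char) (fuel : Nat) (l cur : List Char) (acc : List (List Char)) :
    PySem.Chars.splitOnMax.go sep fuel 0 l cur acc = ((cur.reverse ++ l) :: acc).reverse := by
  cases fuel with
  | zero => simp [PySem.Chars.splitOnMax.go]
  | succ f => cases l with
    | nil => simp [PySem.Chars.splitOnMax.go]
    | cons c rest => simp [PySem.Chars.splitOnMax.go]

theorem pv_go_one (fuel : Nat) (cs cur : List Char) (acc : List (List Char))
    (hf : cs.length ≤ fuel) (hm : ':' ∈ cs) :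
    ∃ a b, PySem.Chars.splitOnMax.go [':'] fuel 1 cs cur acc = acc.reverse ++ [a, b] := by
  induction fuel generalizing cs cur acc with
  | zero =>
    have : cs = [] := List.eq_nil_of_length_eq_zero (Nat.le_zero.mp hf)
    subst this; simp at hm
  | succ fuel ih =>
    cases cs with
    | nil => simp at hm
    | cons c rest =>
      by_cases hc : c = ':'
      · subst hc
        refine ⟨cur.reverse, rest, ?_⟩
        have hpre : [':'].isPrefixOf (':' :: rest) = true := by simp [List.isPrefixOf]
        simp [PySem.Chars.splitOnMax.go, hpre, pv_go_zero]
      · have hpre : [':'].isPrefixOf (c :: rest) = false := by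
          simp [List.isPrefixOf]; exact fun h => hc h.symm
        have hm' : ':' ∈ rest := by
          cases hm with
          | head => exact absurd rfl hc
          | tail _ h => exact h
        obtain ⟨a, b, hab⟩ := ih rest (c :: cur) acc (by simpa using hf) hm'
        exact ⟨a, b, by simp [PySem.Chars.splitOnMax.go, hpre, hab]⟩

theorem pv_split_shape (l : String) (h : pvIsKeyLine l = true) :
    ∃ a b, PySem.Str.splitMax? l ":" 1 = some [a, b] := by
  have hin : PySem.Str.isIn ":" l = true := by
    have h' := h
    simp only [pvIsKeyLine, Bool.and_eq_true] at h'
    exact h'.1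
  have hinf : (":").toList <:+: l.toList := (PySem.Str.isIn_iff_infix _ _).mp hin
  have hm : ':' ∈ l.toList := hinf.subset (by simp)
  obtain ⟨a, b, hab⟩ :=
    pv_go_one (l.length + 1) l.toList [] [] (by simp) hm
  refine ⟨String.ofList a, String.ofList b, ?_⟩
  simp [PySem.Str.splitMax?, PySem.Chars.splitMax?, PySem.Chars.splitOnMax, hab]

-- A's pass over the raw lines equals its pass over the stripped non-empty lines
theorem pv_foldl_strip (lines : List String)
    (st : PySem.Dict String String × Option String × List String) :
    lines.foldl pvStepA st
      = ((lines.map PySem.Str.strip).filter (fun s => s ≠ "")).foldl pvCore st := by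
  induction lines generalizing st with
  | nil => rfl
  | cons a rest ih =>
    by_cases h : PySem.Str.strip a = ""
    · simp [List.foldl_cons, pvStepA, h, ih]
    · simp [List.foldl_cons, pvStepA, h, ih]

-- fuel irrelevance for pvGo
theorem pvGo_fuel_eq (fuel fuel' : Nat) (d : PySem.Dict String String) (ls : List String)
    (h : ls.length ≤ fuel) (h' : ls.length ≤ fuel') : pvGo fuel d ls = pvGo fuel' d ls := by
  induction fuel generalizing fuel' d ls with
  | zero =>
    have : ls = [] := List.eq_nil_of_length_eq_zero (Nat.le_zero.mp h)
    subst this; cases fuel' <;> rfl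
  | succ fuel ih =>
    cases ls with
    | nil => cases fuel' <;> rfl
    | cons head rest =>
      cases fuel' with
      | zero => simp at h'
      | succ fuel' =>
        have hlen : (rest.dropWhile pvNotKey).length ≤ rest.length :=
          List.length_dropWhile_le _ _
        simp only [pvGo]
        exact ih _ _ _ (le_trans hlen (by simpa using h)) (le_trans hlen (by simpa using h'))

theorem pvGo_fuel (fuel : Nat) (d : PySem.Dict String String) (ls : List String)
    (h : ls.length ≤ fuel) : pvGo fuel d ls = pvGo ls.length d ls :=
  pvGo_fuel_eq fuel ls.length d ls h le_rfl

-- main invariant: flushing A's state after the rest of the pass = B's segment loop,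
-- with the pending (ck, cv) absorbing the leading non-key lines
theorem pv_main (ls : List String) (d : PySem.Dict String String)
    (ck : Option String) (cv : List String) :
    pvFlush (ls.foldl pvCore (d, ck, cv)).1 (ls.foldl pvCore (d, ck, cv)).2.1
        (ls.foldl pvCore (d, ck, cv)).2.2
      = pvGo (ls.dropWhile pvNotKey).length
          (pvFlush d ck (cv ++ (if pvTruthy ck then ls.takeWhile pvNotKey else [])))
          (ls.dropWhile pvNotKey) := by
  induction ls generalizing d ck cv with
  | nil => cases h : pvTruthy ck <;> simp [pvGo]
  | cons l ls ih =>
    by_cases hk : pvIsKeyLine l = true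
    · -- key line: flush pending state, start a new segment
      obtain ⟨a, b, hsplit⟩ := pv_split_shape l hk
      have hnk : pvNotKey l = false := by simp [pvNotKey, hk]
      simp only [List.foldl_cons, List.dropWhile_cons, List.takeWhile_cons, hnk,
        Bool.false_eq_true, if_false]
      rw [show pvCore (d, ck, cv) l
            = (pvFlush d ck cv, some (PySem.Str.strip a),
               if PySem.Str.strip b = "" then [] else [PySem.Str.strip b]) by
        simp [pvCore, hk, hsplit]]
      rw [ih]
      simp only [List.length_cons, pvGo]
      rw [pvGo_fuel _ _ _ (List.length_dropWhile_le _ _)]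
      congr 1
      -- pvFlush of the fresh state = pvSeg on the segment
      simp only [pvSeg, hsplit]
      by_cases hkey : PySem.Str.strip a = ""
      · simp [pvFlush, pvTruthy, hkey]
      · by_cases hb : PySem.Str.strip b = "" <;>
          simp [pvFlush, pvTruthy, hkey, hb]
    · -- continuation line
      have hnk : pvNotKey l = true := by simp [pvNotKey, hk]
      have hcore : pvCore (d, ck, cv) l
          = if pvTruthy ck then (d, ck, cv ++ [l]) else (d, ck, cv) := by
        simp [pvCore, hk]
      cases ht : pvTruthy ck with
      | true =>
        simp only [List.foldl_cons, hcore, ht, if_true, ih, List.dropWhile_cons,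
          List.takeWhile_cons, hnk, List.append_assoc, List.cons_append,
          List.nil_append]
      | false =>
        simp only [List.foldl_cons, hcore, ht, Bool.false_eq_true, if_false, ih,
          List.dropWhile_cons, List.takeWhile_cons, hnk, List.append_nil, if_true]

-- ===== VERDICT (by name: the statement is the Claim_ definition above) =====
theorem parse_summary_to_dict_spec : Claim_equal_parse_summary_to_dict := by
  intro t _
  show parse_summary_to_dict t = parse_summary_to_dict_alt t
  simp only [parse_summary_to_dict, parse_summary_to_dict_alt]
  rw [pv_foldl_strip]
  rw [pv_main _ _ _ _]
  simp [pvFlush, pvTruthy]
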